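-- pv_equiv track=rewrite | github.com/Checkmk/checkmk | cmk_base/classic_snmp.py | _is_hex_string
-- ===== SOURCE A (Python) =====
-- def _is_hex_string(value):
--     # as far as I remember, snmpwalk puts a trailing space within
--     # the quotes in case of hex strings. So we require that space
--     # to be present in order make sure, we really deal with a hex string.
--     if value[-1] != ' ':
--         return False
--     hexdigits = "0123456789abcdefABCDEF"
--     n = 0
--     for x in value:
--         if n % 3 == 2:
--             if x != ' ':
--                 return False
--         else:
--             if x not in hexdigits:
--                 return False
--         n += 1
--     return True
-- ===== SOURCE B (Python) =====
-- HEXDIGITS = "0123456789abcdefABCDEF"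
--
-- def _is_hex_string(value):
--     # trailing-space guard (kept first: empty input still raises IndexError)
--     if value[-1] != ' ':
--         return False
--     # consume the string in 3-character groups: two hex digits plus a space
--     rest = value
--     while rest:
--         chunk, rest = rest[:3], rest[3:]
--         if len(chunk) != 3:
--             return False
--         if chunk[0] not in HEXDIGITS or chunk[1] not in HEXDIGITS or chunk[2] != ' ':
--             return False
--     return True
-- ===== Notes on version B (the rewrite author's own statement) =====
-- stated objective: alternative
-- what changed: Replaces the per-character modulo-3 position counter with a group-wise traversal that consumes the string three characters at a time (hex, hex, space), rejecting short final chunks.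
import Mathlib
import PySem

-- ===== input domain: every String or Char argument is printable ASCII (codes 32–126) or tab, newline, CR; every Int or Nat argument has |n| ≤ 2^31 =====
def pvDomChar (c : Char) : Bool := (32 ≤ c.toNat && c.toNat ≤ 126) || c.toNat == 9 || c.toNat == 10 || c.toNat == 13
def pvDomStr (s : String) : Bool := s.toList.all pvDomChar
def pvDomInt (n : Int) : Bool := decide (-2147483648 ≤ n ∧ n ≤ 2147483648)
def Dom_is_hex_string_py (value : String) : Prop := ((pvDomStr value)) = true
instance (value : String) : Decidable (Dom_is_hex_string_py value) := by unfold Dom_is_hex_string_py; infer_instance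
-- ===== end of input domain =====

-- B replaces A's per-character modulo-3 position counter with a group-wise traversal
-- consuming three characters (hex, hex, space) at a time; return values agree on all
-- non-empty inputs (both raise IndexError on "").

-- ===== PORT A =====
def hexdigitsA : List Char := "0123456789abcdefABCDEF".toList

-- the 'for x in value' loop with the counter n
def aLoop : List Char → Int → Bool
  | [], _ => true
  | x :: xs, n =>
    if PySem.Int.mod n 3 == 2 then
      if x ≠ ' ' then false else aLoop xs (n + 1)
    else
      if x ∉ hexdigitsA then false else aLoop xs (n + 1)

def is_hex_string_py (value : String) : Bool :=
  match PySem.Str.pyGet? value (-1) with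
  | none => false      -- value[-1] raises IndexError on ""; excluded by Pre_
  | some c => if c ≠ ' ' then false else aLoop value.toList 0

-- ===== PORT B =====
def hexdigitsB : List Char := "0123456789abcdefABCDEF".toList

-- the 'while rest' loop: chunk, rest = rest[:3], rest[3:]; check the chunk
def bLoop : List Char → Bool
  | [] => true
  | a :: b :: c :: rest =>
      if a ∉ hexdigitsB ∨ b ∉ hexdigitsB ∨ c ≠ ' ' then false else bLoop rest
  | _ => false         -- len(chunk) != 3

def is_hex_string_py_alt (value : String) : Bool :=
  match PySem.Str.pyGet? value (-1) with
  | none => false      -- value[-1] raises IndexError on ""; excluded by Pre_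
  | some c => if c ≠ ' ' then false else bLoop value.toList

-- ===== PRECONDITION & SPEC =====
-- Pre_ excludes only the empty string, on which both A and B raise IndexError at value[-1].
def Pre_is_hex_string_py (value : String) : Prop := value ≠ ""
instance (value : String) : Decidable (Pre_is_hex_string_py value) := by unfold Pre_is_hex_string_py; infer_instance
def pvWitness_is_hex_string_py : String := "ab "

def Spec_is_hex_string_py (value : String) (out : Bool) : Prop := out = is_hex_string_py_alt value
instance (value : String) (out : Bool) : Decidable (Spec_is_hex_string_py value out) := by unfold Spec_is_hex_string_py; infer_instance

-- ===== CLAIM (what is proved, stated in full; the proofs are below) =====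
def Claim_equal_is_hex_string_py : Prop := ∀ (value : String), Dom_is_hex_string_py value → Pre_is_hex_string_py value → Spec_is_hex_string_py value (is_hex_string_py value)

-- ===== LEMMAS AND PROOFS =====

-- Python's % with positive divisor is fmod = emod
lemma fmod_three (n : Int) : Int.fmod n 3 = n % 3 := by
  simp [Int.fmod_eq_emod]

-- A's counter only matters modulo 3
lemma aLoop_mod (cs : List Char) : ∀ n m : Int, PySem.Int.mod n 3 = PySem.Int.mod m 3 →
    aLoop cs n = aLoop cs m := by
  induction cs with
  | nil => intro n m _; rfl
  | cons x xs ih =>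
    intro n m h
    simp only [PySem.Int.mod, fmod_three] at h
    simp only [aLoop, PySem.Int.mod, fmod_three, h]
    split_ifs <;> first
      | rfl
      | exact ih _ _ (by simp only [PySem.Int.mod, fmod_three]; omega)

lemma space_not_hex : ' ' ∉ hexdigitsA := by decide

lemma hexAB : hexdigitsB = hexdigitsA := rfl

-- key lemma: when the last character is a space, A's loop from 0 agrees with B's chunk loop
lemma loop_agree : ∀ cs : List Char, cs.getLast? = some ' ' → aLoop cs 0 = bLoop cs
  | [], h => by simp at h
  | [a], h => by
      simp at h; subst h; decide
  | [a, b], h => by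
      have hb : b = ' ' := by simpa [List.getLast?] using h
      subst hb
      by_cases ha : a ∈ hexdigitsA <;>
        simp [aLoop, bLoop, ha, space_not_hex]
  | a :: b :: c :: rest, h => by
      have h3 : aLoop rest 3 = aLoop rest 0 := aLoop_mod _ 3 0 (by decide)
      have lhs : aLoop (a :: b :: c :: rest) 0
          = if a ∉ hexdigitsA then false else if b ∉ hexdigitsA then false
            else if c ≠ ' ' then false else aLoop rest 3 := rfl
      have rhs : bLoop (a :: b :: c :: rest)
          = if a ∉ hexdigitsB ∨ b ∉ hexdigitsB ∨ c ≠ ' ' then false else bLoop rest := rfl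
      rw [lhs, rhs]
      by_cases ha : a ∈ hexdigitsA <;> by_cases hb : b ∈ hexdigitsA <;> by_cases hc : c = ' ' <;>
        simp [hexAB, ha, hb, hc, h3]
      by_cases hr : rest = []
      · subst hr; rfl
      · exact loop_agree rest (by
          rcases rest with _ | ⟨d, t⟩
          · exact absurd rfl hr
          · simpa [List.getLast?_cons_cons] using h)
termination_by cs => cs.length
decreasing_by simp; omega

-- ===== VERDICT (by name: the statement is the Claim_ definition above) =====
theorem is_hex_string_py_spec : Claim_equal_is_hex_string_py := by
  intro value _ hpre
  unfold Spec_is_hex_string_py is_hex_string_py is_hex_string_py_alt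
  have : PySem.Str.pyGet? value (-1) = value.toList.getLast? := by
    simp [PySem.Str.pyGet?, PySem.List.pyGet?_neg_one]
  rw [this]
  match hg : value.toList.getLast? with
  | none => rfl
  | some c =>
    by_cases hc : c = ' '
    · subst hc; simp [loop_agree _ hg]
    · simp [hc]
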